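-- pv_equiv track=rewrite | github.com/floresgfelipe/verano_2023 | app/genera_boletas.py | split_parroquia
-- ===== SOURCE A (Python) =====
-- def split_parroquia(parroquia):
--     sp = parroquia.split()
--     i = 0
--     splitted_parroquia = ['', '']
--
--     for s in sp:
--         if i < len(parroquia) / 2:
--             splitted_parroquia[0] += s + ' '
--             i += len(s)
--         else:
--             splitted_parroquia[1] += s + ' '
--
--     return splitted_parroquia
-- ===== SOURCE B (Python) =====
-- def split_parroquia(parroquia):
--     words = parroquia.split()
--     half = len(parroquia) / 2
--     k = 0
--     total = 0
--     for w in words: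
--         if total >= half:
--             break
--         total += len(w)
--         k += 1
--     first = ''.join(w + ' ' for w in words[:k])
--     second = ''.join(w + ' ' for w in words[k:])
--     return [first, second]
-- ===== Notes on version B (the rewrite author's own statement) =====
-- stated objective: simpler
-- what changed: B replaces A's single stateful loop that routes every word into one of two growing strings with a two-phase decomposition: first find the split index k by accumulating word lengths until the threshold len(parroquia)/2 is reached, then slice the word list into words[:k] / words[k:] and join each part.
import Mathlib
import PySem

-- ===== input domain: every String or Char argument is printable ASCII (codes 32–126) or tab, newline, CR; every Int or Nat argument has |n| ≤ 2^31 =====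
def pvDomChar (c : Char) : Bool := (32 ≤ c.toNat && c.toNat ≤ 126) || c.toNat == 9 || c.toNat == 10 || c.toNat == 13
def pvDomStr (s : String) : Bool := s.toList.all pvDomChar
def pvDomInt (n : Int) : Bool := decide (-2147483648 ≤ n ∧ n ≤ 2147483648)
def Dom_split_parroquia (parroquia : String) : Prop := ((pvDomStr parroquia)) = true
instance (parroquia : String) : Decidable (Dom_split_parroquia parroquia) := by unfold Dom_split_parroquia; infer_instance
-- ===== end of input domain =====

-- B splits the task in two phases (find the split index k, then slice and join) instead of
-- A's single loop routing each word into one of two growing strings; same cost, simpler shape.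

-- ===== PORT A =====
-- Python's 'i < len(parroquia) / 2' compares ints against a float; '2 * i < len' is exact here
-- (both sides are small integers, so the float comparison is exact).
def split_parroquia (parroquia : String) : List String :=
  let sp := PySem.Str.split₀ parroquia
  let st : Int × String × String :=
    sp.foldl (fun st s =>
      if 2 * st.1 < PySem.Str.len parroquia then
        (st.1 + PySem.Str.len s, st.2.1 ++ s ++ " ", st.2.2)
      else
        (st.1, st.2.1, st.2.2 ++ s ++ " ")) (0, "", "")
  [st.2.1, st.2.2]

-- ===== PORT B =====
-- the 'for w in words: if total >= half: break; total += len(w); k += 1' loop of Source B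
def splitIdx (n : Int) (total : Int) : List String → Nat
  | [] => 0
  | w :: ws => if 2 * total < n then splitIdx n (total + PySem.Str.len w) ws + 1 else 0

def split_parroquia_alt (parroquia : String) : List String :=
  let words := PySem.Str.split₀ parroquia
  let k := splitIdx (PySem.Str.len parroquia) 0 words
  let first := PySem.Str.join "" ((words.take k).map (fun w => w ++ " "))
  let second := PySem.Str.join "" ((words.drop k).map (fun w => w ++ " "))
  [first, second]

-- ===== PRECONDITION & SPEC =====
def Spec_split_parroquia (parroquia : String) (out : List String) : Prop := out = split_parroquia_alt parroquia
instance (parroquia : String) (out : List String) : Decidable (Spec_split_parroquia parroquia out) := by unfold Spec_split_parroquia; infer_instance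

-- ===== CLAIM (what is proved, stated in full; the proofs are below) =====
def Claim_equal_split_parroquia : Prop := ∀ (parroquia : String), Dom_split_parroquia parroquia → Spec_split_parroquia parroquia (split_parroquia parroquia)

-- ===== LEMMAS AND PROOFS =====
theorem inter_nil (l : List (List Char)) : List.intercalate [] l = l.flatten := by
  induction l with
  | nil => rfl
  | cons a l ih =>
    cases l with
    | nil => simp [List.intercalate]
    | cons b l => simp_all [List.intercalate, List.intersperse]

theorem join_nil' : PySem.Str.join "" ([] : List String) = "" := rfl

theorem join_cons' (w : String) (ws : List String) :
    PySem.Str.join "" (w :: ws) = w ++ PySem.Str.join "" ws := by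
  simp [PySem.Str.join, PySem.Chars.join, inter_nil]

-- the body of A's fold, abbreviated
def stepA (n : Int) (st : Int × String × String) (s : String) : Int × String × String :=
  if 2 * st.1 < n then (st.1 + PySem.Str.len s, st.2.1 ++ s ++ " ", st.2.2)
  else (st.1, st.2.1, st.2.2 ++ s ++ " ")

-- once the threshold is passed, every remaining word is appended to the second string
theorem foldA_else (n : Int) (ws : List String) (acc : Int) (s0 s1 : String)
    (h : ¬ 2 * acc < n) :
    ws.foldl (stepA n) (acc, s0, s1)
      = (acc, s0, s1 ++ PySem.Str.join "" (ws.map (fun w => w ++ " "))) := by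
  induction ws generalizing s1 with
  | nil => simp [join_nil']
  | cons w ws ih =>
    simp only [List.foldl_cons, stepA, if_neg h, List.map_cons, join_cons', ih]
    simp [String.append_assoc]

-- the main invariant: A's fold realises B's slice-at-k decomposition
theorem foldA_eq (n : Int) (ws : List String) (acc : Int) (s0 s1 : String) :
    ws.foldl (stepA n) (acc, s0, s1)
      = ((ws.take (splitIdx n acc ws)).foldl (fun a w => a + PySem.Str.len w) acc,
         s0 ++ PySem.Str.join "" ((ws.take (splitIdx n acc ws)).map (fun w => w ++ " ")),
         s1 ++ PySem.Str.join "" ((ws.drop (splitIdx n acc ws)).map (fun w => w ++ " "))) := by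
  induction ws generalizing acc s0 with
  | nil => simp [splitIdx, join_nil']
  | cons w ws ih =>
    by_cases h : 2 * acc < n
    · simp only [splitIdx, if_pos h, List.foldl_cons, stepA, List.take_succ_cons,
        List.drop_succ_cons, List.map_cons, join_cons']
      rw [ih]
      simp [String.append_assoc]
    · simp only [splitIdx, if_neg h, List.take_zero, List.drop_zero, List.foldl_nil,
        List.map_nil, join_nil', String.append_empty]
      exact foldA_else n (w :: ws) acc s0 s1 h

-- ===== VERDICT (by name: the statement is the Claim_ definition above) =====
theorem split_parroquia_spec : Claim_equal_split_parroquia := by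
  intro parroquia _
  unfold Spec_split_parroquia split_parroquia split_parroquia_alt
  have := foldA_eq (PySem.Str.len parroquia) (PySem.Str.split₀ parroquia) 0 "" ""
  simp only [show (fun (st : Int × String × String) s =>
      if 2 * st.1 < PySem.Str.len parroquia then
        (st.1 + PySem.Str.len s, st.2.1 ++ s ++ " ", st.2.2)
      else (st.1, st.2.1, st.2.2 ++ s ++ " ")) = stepA (PySem.Str.len parroquia) from rfl]
  rw [this]
  simp
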